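-- pv_equiv track=rewrite | github.com/davidfarrimond23/Battleships | battleships (1).py | populateList
-- ===== SOURCE A (Python) =====
-- def populateList(populatedBoard):
--     potentialList = []
--     for x in range(len(populatedBoard[0])):
--         if x % 2 != 0 or x == 0:
--             for y in range(len(populatedBoard[0])):
--                 if y % 2 != 0 or y == 0:
--                     potentialList.append((x, y))
--     return potentialList
-- ===== SOURCE B (Python) =====
-- def populateList(populatedBoard):
--     n = len(populatedBoard[0])
--     if n == 0:
--         return []
--     m = n // 2 + 1
--     out = []
--     for k in range(m * m):
--         x, y = divmod(k, m)
--         out.append((0 if x == 0 else 2 * x - 1, 0 if y == 0 else 2 * y - 1))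
--     return out
-- ===== Notes on version B (the rewrite author's own statement) =====
-- stated objective: alternative
-- what changed: B replaces A's nested filtering loops by a closed-form construction: it computes the count m of valid indices arithmetically (m = n//2 + 1), iterates one flat range(m*m), and decodes each k by divmod into the x-th/y-th valid index via the formula j==0 -> 0 else 2j-1, so no index is ever tested for validity.
import Mathlib
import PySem

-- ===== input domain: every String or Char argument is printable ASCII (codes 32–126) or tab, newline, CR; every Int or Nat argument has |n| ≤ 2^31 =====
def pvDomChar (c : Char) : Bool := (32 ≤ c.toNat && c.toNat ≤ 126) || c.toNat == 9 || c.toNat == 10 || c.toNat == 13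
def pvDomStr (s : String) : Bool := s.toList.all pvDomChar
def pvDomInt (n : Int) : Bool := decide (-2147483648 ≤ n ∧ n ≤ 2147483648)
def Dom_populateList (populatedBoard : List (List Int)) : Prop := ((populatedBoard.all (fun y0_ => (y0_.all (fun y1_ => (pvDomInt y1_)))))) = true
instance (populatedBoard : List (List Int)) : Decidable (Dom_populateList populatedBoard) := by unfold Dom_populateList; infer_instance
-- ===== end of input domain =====

-- B builds the answer in closed form: it computes the number m of valid indices arithmetically and decodes one flat range(m*m) by divmod, instead of A's nested loops re-testing every index (alternative algorithm, same output).


-- ===== PORT A =====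
def populateList (populatedBoard : List (List Int)) : List (Int × Int) :=
  let n : Int := (populatedBoard.headD []).length
  (PySem.List.pyRange 0 n 1).foldl (fun acc x =>
    if PySem.Int.mod x 2 != 0 || x == 0 then
      (PySem.List.pyRange 0 n 1).foldl (fun acc2 y =>
        if PySem.Int.mod y 2 != 0 || y == 0 then acc2 ++ [(x, y)] else acc2) acc
    else acc) []

-- ===== PORT B =====
def populateList_alt (populatedBoard : List (List Int)) : List (Int × Int) :=
  let n : Int := (populatedBoard.headD []).length
  if n == 0 then []
  else
    let m : Int := PySem.Int.floordiv n 2 + 1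
    (PySem.List.pyRange 0 (m * m) 1).foldl (fun out k =>
      let x := PySem.Int.floordiv k m
      let y := PySem.Int.mod k m
      out ++ [((if x == 0 then 0 else 2 * x - 1), (if y == 0 then 0 else 2 * y - 1))]) []

-- ===== PRECONDITION & SPEC =====
-- Pre_ excludes only the empty board, on which Python A (and B) raise IndexError at populatedBoard[0].
def Pre_populateList (populatedBoard : List (List Int)) : Prop := populatedBoard ≠ []
instance (populatedBoard : List (List Int)) : Decidable (Pre_populateList populatedBoard) := by unfold Pre_populateList; infer_instance
def pvWitness_populateList : List (List Int) := [[1, 2, 3]]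
def Spec_populateList (populatedBoard : List (List Int)) (out : List (Int × Int)) : Prop := out = populateList_alt populatedBoard
instance (populatedBoard : List (List Int)) (out : List (Int × Int)) : Decidable (Spec_populateList populatedBoard out) := by unfold Spec_populateList; infer_instance

-- ===== CLAIM (what is proved, stated in full; the proofs are below) =====
def Claim_equal_populateList : Prop := ∀ (populatedBoard : List (List Int)), Dom_populateList populatedBoard → Pre_populateList populatedBoard → Spec_populateList populatedBoard (populateList populatedBoard)

-- ===== LEMMAS AND PROOFS =====

-- the j-th valid index, as an Int-valued function of a Nat position
def pvG (j : Nat) : Int := if j = 0 then 0 else 2 * (j : Int) - 1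

-- generic loop shape: 'if p(x): out += g(x)' over a list is append of flatMap of filter
theorem pv_foldl_append_if_block {α β : Type} (p : α → Bool) (g : α → List β) :
    ∀ (l : List α) (acc : List β),
      l.foldl (fun a x => if p x then a ++ g x else a) acc = acc ++ (l.filter p).flatMap g := by
  intro l
  induction l with
  | nil => simp
  | cons h t ih =>
    intro acc
    by_cases hp : p h = true <;> simp [List.foldl_cons, hp, ih]

-- KEY LEMMA 1: the valid indices below N, in order, are exactly pvG 0, …, pvG (N/2)
theorem pv_filter_valid (N : Nat) (hN : 1 ≤ N) :
    List.map (fun k : Nat => (k : Int)) ((List.range N).filter (fun i => !(i % 2 == 0) || (i == 0)))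
      = (List.range (N / 2 + 1)).map pvG := by
  induction N with
  | zero => omega
  | succ N ih =>
    by_cases h1 : N = 0
    · subst h1; decide
    · have hN1 : 1 ≤ N := by omega
      rw [List.range_succ, List.filter_append, List.map_append, ih hN1]
      rcases Nat.even_or_odd N with he | ho
      · -- N even (and ≥ 2): N is not valid, and (N+1)/2 = N/2
        have hmod : N % 2 = 0 := Nat.even_iff.mp he
        have hsucc : (N + 1) / 2 = N / 2 := by omega
        simp [hmod, h1, hsucc]
      · -- N odd: N is valid, appended at the end; (N+1)/2 = N/2 + 1 and pvG (N/2+1) = N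
        have hmod : N % 2 = 1 := Nat.odd_iff.mp ho
        have hsucc : (N + 1) / 2 + 1 = (N / 2 + 1) + 1 := by omega
        have hg : pvG (N / 2 + 1) = (N : Int) := by
          unfold pvG
          simp only [if_neg (by omega : ¬ N / 2 + 1 = 0)]
          push_cast
          omega
        simp [hmod, hsucc, List.range_succ, hg]

-- KEY LEMMA 2: decoding range (a*M) by divmod M is the product of range a and range M
theorem pv_range_divmod (M : Nat) (hM : 0 < M) :
    ∀ (a : Nat),
      (List.range (a * M)).map (fun k => (pvG (k / M), pvG (k % M)))
        = (List.range a).flatMap (fun x => (List.range M).map (fun y => (pvG x, pvG y))) := by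
  intro a
  induction a with
  | zero => simp
  | succ a ih =>
    rw [Nat.succ_mul, List.range_add, List.map_append, List.map_map, ih,
        List.range_succ, List.flatMap_append]
    congr 1
    simp only [List.flatMap_cons, List.flatMap_nil, List.append_nil]
    apply List.map_congr_left
    intro y hy
    have hylt : y < M := List.mem_range.mp hy
    have h1 : (a * M + y) / M = a := by
      rw [Nat.mul_comm a M, Nat.mul_add_div hM, Nat.div_eq_of_lt hylt]; omega
    have h2 : (a * M + y) % M = y := by
      rw [Nat.mul_comm a M, Nat.mul_add_mod, Nat.mod_eq_of_lt hylt]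
    simp only [Function.comp]
    rw [h1, h2]


-- the Int-level validity test agrees with the Nat-level one on casts
theorem pv_pred_cast (i : Nat) :
    ((fun i => PySem.Int.mod i 2 != 0 || i == 0) ∘ (fun k : Nat => (k : Int))) i
      = (!(i % 2 == 0) || (i == 0)) := by
  simp only [Function.comp]
  rw [show ((2 : Int)) = ((2 : Nat) : Int) from rfl, PySem.Int.mod_natCast]
  rcases Nat.even_or_odd i with he | ho
  · have h2 : i % 2 = 0 := Nat.even_iff.mp he
    simp [h2, Int.natCast_eq_zero]
  · have h2 : i % 2 = 1 := Nat.odd_iff.mp ho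
    simp [h2]

-- the conditional expression on a cast is pvG
theorem pv_decode1 (a : Nat) :
    (if ((a : Int) == 0) then (0 : Int) else 2 * (a : Int) - 1) = pvG a := by
  unfold pvG
  by_cases h : a = 0 <;> simp [h, Int.natCast_eq_zero]

-- ===== VERDICT (by name: the statement is the Claim_ definition above) =====
theorem populateList_spec : Claim_equal_populateList := by
  intro pb _ _
  show populateList pb = populateList_alt pb
  unfold populateList populateList_alt
  set N : Nat := (pb.headD []).length with hN
  by_cases h0 : N = 0
  · simp [h0, PySem.List.pyRange_one_eq_nil]
  · -- nonempty first row
    have hN1 : 1 ≤ N := by omega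
    have hne : (((N : Int)) == 0) = false := by
      simp only [beq_eq_false_iff_ne, ne_eq, Int.natCast_eq_zero]; omega
    set M : Nat := N / 2 + 1 with hM
    have hMpos : 0 < M := by omega
    have hmInt : PySem.Int.floordiv (N : Int) 2 + 1 = (M : Int) := by
      rw [show ((2 : Int)) = ((2 : Nat) : Int) from rfl, PySem.Int.floordiv_natCast]
      rw [hM]; push_cast; ring
    -- A side: two loop-shape rewrites, then the closed form of the filtered range
    simp only [PySem.List.foldl_append_if]
    rw [pv_foldl_append_if_block]
    simp only [List.nil_append]
    rw [PySem.List.pyRange_zero_nat N, List.filter_map,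
        List.filter_congr (fun i _ => pv_pred_cast i), pv_filter_valid N hN1, ← hM]
    -- B side: loop shape is a plain map; decode each k by divmod
    simp only [hne, hmInt, PySem.List.foldl_append_singleton_eq_map, List.nil_append]
    rw [show ((M : Int) * (M : Int)) = ((M * M : Nat) : Int) by push_cast; ring,
        PySem.List.pyRange_zero_nat (M * M), List.map_map]
    simp only [Function.comp_def, PySem.Int.floordiv_natCast, PySem.Int.mod_natCast, pv_decode1]
    rw [pv_range_divmod M hMpos M]
    simp [List.flatMap_map, List.map_map, Function.comp_def]
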